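-- pv_equiv track=rewrite | github.com/whyang15/FastAnalysis---A-CERF-Application | Group_Test_2.py | coding_region_finder
-- ===== SOURCE A (Python) =====
-- def coding_region_finder(codon_list):
--     stop_codons = ['TTA', 'TGA', 'TAG']
--     start_positions = [pos for pos, start in enumerate(codon_list) if start == 'ATG']
--     stop_positions = [pos for pos, stop in enumerate (codon_list) if stop in stop_codons]
--     coding_regions = {}
--
--     write = False
--     temp_seq = ''
--     count = 0
--     for pos in range (0, len(codon_list), 4):
--         codon = codon_list[pos:pos+3]
--         if codon == 'ATG':
--             write = True
--         if write == True:
--             temp_seq = temp_seq + ' ' + codon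
--         if codon in stop_codons:
--             write = False
--             coding_regions[count] = temp_seq.lstrip()
--             temp_seq = ''
--             count += 1
--     return coding_regions
-- ===== SOURCE B (Python) =====
-- def coding_region_finder(codon_list):
--     # Boundary-scan decomposition: tokenize once, then for each stop-codon token
--     # close a region whose content starts at the first 'ATG' after the previous stop.
--     stop_codons = ('TTA', 'TGA', 'TAG')
--     tokens = [codon_list[i:i + 3] for i in range(0, len(codon_list), 4)]
--     regions = {}
--     prev = -1
--     for s in range(len(tokens)):
--         if tokens[s] in stop_codons:
--             start = None
--             for j in range(prev + 1, s + 1):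
--                 if tokens[j] == 'ATG':
--                     start = j
--                     break
--             if start is None:
--                 regions[len(regions)] = ''
--             else:
--                 regions[len(regions)] = ' '.join(tokens[start:s + 1])
--             prev = s
--     return regions
-- ===== Notes on version B (the rewrite author's own statement) =====
-- stated objective: alternative
-- what changed: Replaces A's single-pass write-flag/string-accumulator state machine with a tokenize-once boundary scan: for each stop-codon token it searches back from the previous stop for the opening start codon and joins that token span directly.
import Mathlib
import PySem

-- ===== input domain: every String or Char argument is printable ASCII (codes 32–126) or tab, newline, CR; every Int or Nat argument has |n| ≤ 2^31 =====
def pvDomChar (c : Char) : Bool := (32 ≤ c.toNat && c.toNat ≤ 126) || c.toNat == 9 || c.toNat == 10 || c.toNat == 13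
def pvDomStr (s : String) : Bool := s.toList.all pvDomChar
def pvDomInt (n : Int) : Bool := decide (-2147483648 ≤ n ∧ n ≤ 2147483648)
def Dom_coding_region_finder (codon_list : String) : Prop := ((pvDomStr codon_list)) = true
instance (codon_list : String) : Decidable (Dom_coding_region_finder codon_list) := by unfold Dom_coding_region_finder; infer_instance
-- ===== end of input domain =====

-- B replaces A's write-flag/string-accumulator pass by a boundary scan over the token
-- list (for each stop-codon token, search back for the opening 'ATG'); objective: alternative.
-- Both Pythons build dicts whose keys are always FRESH consecutive ints (A's count,
-- B's len(regions)), so each dict insertion is ported as appending to the association list.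

def pvStops : List (List Char) := [['T','T','A'], ['T','G','A'], ['T','A','G']]
def pvATG : List Char := ['A','T','G']

-- ===== PORT A =====
-- one iteration of A's for-loop body, on the sliced codon; state = (write, temp_seq, coding_regions, count)
def pvStepA (st : Bool × List Char × List (Int × String) × Int) (codon : List Char) :
    Bool × List Char × List (Int × String) × Int :=
  let write := if codon = pvATG then true else st.1
  let temp := if write = true then st.2.1 ++ ' ' :: codon else st.2.1
  if codon ∈ pvStops then
    (false, [], st.2.2.1 ++ [(st.2.2.2, String.ofList (PySem.Chars.lstrip temp))], st.2.2.2 + 1)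
  else
    (write, temp, st.2.2.1, st.2.2.2)

def coding_region_finder (codon_list : String) : List (Int × String) :=
  let cl := codon_list.toList
  -- A's start_positions / stop_positions compare a single CHARACTER with 3-char codons,
  -- so both filters are identically false; ported literally, and (as in A) never used.
  let _start_positions :=
    ((PySem.List.enumerate cl 0).filter (fun p => [p.2] = pvATG)).map (·.1)
  let _stop_positions :=
    ((PySem.List.enumerate cl 0).filter (fun p => [p.2] ∈ pvStops)).map (·.1)
  let fin := (PySem.List.pyRange 0 (cl.length : Int) 4).foldl
    (fun st pos => pvStepA st (PySem.List.slice cl (some pos) (some (pos + 3))))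
    (false, [], [], 0)
  fin.2.2.1

-- ===== PORT B =====
-- B's inner for-loop: first j in range(prev+1, n) with tokens[j] == 'ATG' (break), else None
def pvFind (tokens : List (List Char)) (prev n : Int) : Option Int :=
  (PySem.List.pyRange (prev + 1) n 1).find? (fun j => PySem.List.pyGetD tokens j [] = pvATG)

-- one iteration of B's outer loop at index s; state = (regions, prev)
def pvStepB (tokens : List (List Char)) (st : List (Int × String) × Int) (s : Int) :
    List (Int × String) × Int :=
  if PySem.List.pyGetD tokens s [] ∈ pvStops then
    match pvFind tokens st.2 (s + 1) with
    | none => (st.1 ++ [((st.1.length : Int), "")], s)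
    | some f =>
        (st.1 ++ [((st.1.length : Int),
          String.ofList (PySem.Chars.join [' '] (PySem.List.slice tokens (some f) (some (s + 1)))))], s)
  else st

def coding_region_finder_alt (codon_list : String) : List (Int × String) :=
  let cl := codon_list.toList
  let tokens := (PySem.List.pyRange 0 (cl.length : Int) 4).map
    (fun i => PySem.List.slice cl (some i) (some (i + 3)))
  let fin := (PySem.List.pyRange 0 (tokens.length : Int) 1).foldl (pvStepB tokens) ([], -1)
  fin.1

-- ===== PRECONDITION & SPEC =====
def Spec_coding_region_finder (codon_list : String) (out : List (Int × String)) : Prop := out = coding_region_finder_alt codon_list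
instance (codon_list : String) (out : List (Int × String)) : Decidable (Spec_coding_region_finder codon_list out) := by unfold Spec_coding_region_finder; infer_instance

-- ===== CLAIM (what is proved, stated in full; the proofs are below) =====
def Claim_equal_coding_region_finder : Prop := ∀ (codon_list : String), Dom_coding_region_finder codon_list → Spec_coding_region_finder codon_list (coding_region_finder codon_list)

-- ===== LEMMAS AND PROOFS =====

-- the value B records for the region ending at token index n (n excluded from the search start)
def pvRegion (tokens : List (List Char)) (prev n : Int) : String :=
  match pvFind tokens prev n with
  | none => ""
  | some f => String.ofList (PySem.Chars.join [' '] (PySem.List.slice tokens (some f) (some (n + 1))))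

lemma pv_join_eq_flat (xs : List (List Char)) (x : List Char) :
    PySem.Chars.join [' '] (x :: xs) = x ++ xs.flatMap (fun tok => ' ' :: tok) := by
  induction xs generalizing x with
  | nil => simp [PySem.Chars.join_singleton]
  | cons y ys ih => simp [PySem.Chars.join_cons_cons, ih y]

lemma pv_lstrip (r : List Char) :
    PySem.Chars.lstrip (' ' :: 'A' :: 'T' :: 'G' :: r) = 'A' :: 'T' :: 'G' :: r := by
  simp [PySem.Chars.lstrip, PySem.Chars.isspace]

lemma pv_stop_ne_atg {tok : List Char} (h : tok ∈ pvStops) : tok ≠ pvATG := by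
  fin_cases h <;> decide

-- extending the search range by one index
lemma pv_find_succ (tokens : List (List Char)) (prev n : Int) (h : prev + 1 ≤ n) :
    pvFind tokens prev (n + 1) =
      (pvFind tokens prev n).or
        (if PySem.List.pyGetD tokens n [] = pvATG then some n else none) := by
  unfold pvFind
  rw [PySem.List.pyRange_one_succ_right h, List.find?_append]
  congr 1
  by_cases hx : PySem.List.pyGetD tokens n [] = pvATG <;> simp [List.find?, hx]

lemma pv_find_empty (tokens : List (List Char)) (n : Int) : pvFind tokens n (n + 1) = none := by
  unfold pvFind
  rw [PySem.List.pyRange_one_eq_nil (by omega)]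
  rfl

-- the main loop invariant lemma
lemma pv_loop_eq (tokens : List (List Char)) :
    ∀ (rest pre : List (List Char)), tokens = pre ++ rest →
    ∀ (acc : List (Int × String)) (prev : Int) (w : Bool) (t : List Char) (c : Int),
      -1 ≤ prev → prev + 1 ≤ (pre.length : Int) → c = (acc.length : Int) →
      (pvFind tokens prev (pre.length : Int) = none → w = false ∧ t = []) →
      (∀ f, pvFind tokens prev (pre.length : Int) = some f →
        w = true ∧ t = (pre.drop f.toNat).flatMap (fun tok => ' ' :: tok) ∧
        PySem.List.pyGetD tokens f [] = pvATG) →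
      (rest.foldl pvStepA (w, t, acc, c)).2.2.1 =
        ((PySem.List.pyRange (pre.length : Int) ((pre.length : Int) + (rest.length : Int)) 1).foldl
          (pvStepB tokens) (acc, prev)).1 := by
  intro rest
  induction rest with
  | nil =>
    intro pre h acc prev w t c h1 h2 h3 hnone hsome
    rw [show ((pre.length : Int) + ((([] : List (List Char)).length : Nat) : Int)) = (pre.length : Int) by simp,
      PySem.List.pyRange_one_eq_nil (le_refl _)]
    rfl
  | cons tok rest' ih =>
    intro pre h acc prev w t c h1 h2 h3 hnone hsome
    have hlen : ((pre.length : Int) + (((tok :: rest').length : Nat) : Int)) =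
        ((pre.length : Int) + 1) + ((rest'.length : Nat) : Int) := by
      simp; omega
    rw [hlen, PySem.List.pyRange_one_cons (by omega)]
    -- the current token really is tokens[pre.length]
    have htok : PySem.List.pyGetD tokens (pre.length : Int) [] = tok := by
      rw [PySem.List.pyGetD_eq_getElem tokens [] (by omega) (by simp [h])]
      simp [h]
    have hsucc := pv_find_succ tokens prev (pre.length : Int) h2
    rw [htok] at hsucc
    have hsplit' : tokens = (pre ++ [tok]) ++ rest' := by simp [h]
    have hlen' : (((pre ++ [tok]).length : Nat) : Int) = (pre.length : Int) + 1 := by simp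
    simp only [List.foldl_cons]
    by_cases hstop : tok ∈ pvStops
    · -- a stop codon: both sides close a region
      have hne := pv_stop_ne_atg hstop
      have hfind' : pvFind tokens prev ((pre.length : Int) + 1) = pvFind tokens prev (pre.length : Int) := by
        rw [hsucc, if_neg hne, Option.or_none]
      have hB : pvStepB tokens (acc, prev) (pre.length : Int) =
          (acc ++ [((acc.length : Int), pvRegion tokens prev (pre.length : Int))],
            (pre.length : Int)) := by
        rcases hfd : pvFind tokens prev (pre.length : Int) with _ | f <;>
          simp [pvStepB, htok, hstop, pvRegion, hfind', hfd]
      rw [hB]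
      -- A closes the region with the same string
      have hA : pvStepA (w, t, acc, c) tok =
          (false, [], acc ++ [((acc.length : Int), pvRegion tokens prev (pre.length : Int))], c + 1) := by
        rcases hfd : pvFind tokens prev (pre.length : Int) with _ | f
        · obtain ⟨rfl, rfl⟩ := hnone hfd
          simp [pvStepA, hstop, if_neg hne, pvRegion, hfd, h3, PySem.Chars.lstrip]
        · obtain ⟨rfl, rfl, hatg⟩ := hsome f hfd
          have hmem := List.mem_of_find?_eq_some hfd
          rw [PySem.List.mem_pyRange_one] at hmem
          have hfnat : f.toNat < pre.length := by omega
          have hatg' := hatg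
          rw [hsplit'] at hatg'
          rw [PySem.List.pyGetD_eq_getElem _ [] (by omega) (by simp; omega)] at hatg'
          have hgetPre : (pre ++ [tok])[f.toNat]'(by simp; omega) = pvATG := by
            rw [← hatg']
            exact (List.getElem_append_left (by simp; omega)).symm
          -- the accumulated temp, extended by the stop codon, is the flattened segment
          have hseg : (pre.drop f.toNat).flatMap (fun tok => ' ' :: tok) ++ ' ' :: tok =
              ((pre ++ [tok]).drop f.toNat).flatMap (fun tok => ' ' :: tok) := by
            rw [List.drop_append_of_le_length (by omega)]
            simp
          have hsegcons : (pre ++ [tok]).drop f.toNat =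
              pvATG :: ((pre ++ [tok]).drop (f.toNat + 1)) := by
            rw [List.drop_eq_getElem_cons (by simp; omega), hgetPre]
          -- B's slice is the same segment
          have hslice : PySem.List.slice tokens (some f) (some ((pre.length : Int) + 1)) =
              (pre ++ [tok]).drop f.toNat := by
            rw [PySem.List.slice_toNat tokens (by omega) (by omega), hsplit',
              List.drop_append_of_le_length (by simp; omega)]
            apply List.take_left'
            simp

          have hstr : PySem.Chars.lstrip ((pre.drop f.toNat).flatMap (fun tok => ' ' :: tok) ++ ' ' :: tok) =
              PySem.Chars.join [' '] (PySem.List.slice tokens (some f) (some ((pre.length : Int) + 1))) := by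
            rw [hseg, hslice, hsegcons, pv_join_eq_flat]
            show PySem.Chars.lstrip (' ' :: 'A' :: 'T' :: 'G' :: _) = _
            rw [pv_lstrip]
            rfl
          simp only [pvStepA, if_neg hne, if_pos hstop]
          rw [pvRegion, hfd]
          simp [hstr, h3]
      rw [hA, ← hlen']
      apply ih (pre ++ [tok]) hsplit' _ (pre.length : Int) false [] (c + 1)
        (by omega) (by simp) (by simp [h3])
      · intro _; exact ⟨rfl, rfl⟩
      · intro f hf
        rw [hlen', pv_find_empty] at hf
        simp at hf
    · -- not a stop codon: B's state is unchanged, A updates write/temp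
      have hB : pvStepB tokens (acc, prev) (pre.length : Int) = (acc, prev) := by
        simp [pvStepB, htok, hstop]
      rw [hB]
      rcases hfd : pvFind tokens prev (pre.length : Int) with _ | f
      · obtain ⟨rfl, rfl⟩ := hnone hfd
        by_cases hA : tok = pvATG
        · have hstep : pvStepA (false, [], acc, c) tok = (true, ' ' :: tok, acc, c) := by
            simp [pvStepA, hA]
            decide
          rw [hstep, ← hlen']
          apply ih (pre ++ [tok]) hsplit' acc prev true (' ' :: tok) c h1 (by simp; omega) h3
          · intro hf
            rw [hlen', hsucc, hfd, if_pos hA] at hf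
            simp at hf
          · intro f hf
            rw [hlen', hsucc, hfd, if_pos hA] at hf
            simp only [Option.or, Option.some.injEq] at hf
            subst hf
            refine ⟨rfl, ?_, by rw [htok, hA]⟩
            rw [Int.toNat_natCast, List.drop_append_of_le_length (le_refl _)]
            simp
        · have hstep : pvStepA (false, [], acc, c) tok = (false, [], acc, c) := by
            simp [pvStepA, hA, hstop]
          rw [hstep, ← hlen']
          apply ih (pre ++ [tok]) hsplit' acc prev false [] c h1 (by simp; omega) h3
          · intro _; exact ⟨rfl, rfl⟩
          · intro f hf
            rw [hlen', hsucc, hfd, if_neg hA] at hf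
            simp at hf
      · obtain ⟨rfl, rfl, hatg⟩ := hsome f hfd
        have hmem := List.mem_of_find?_eq_some hfd
        rw [PySem.List.mem_pyRange_one] at hmem
        have hfnat : f.toNat ≤ pre.length := by omega
        have hstep : pvStepA (true, (pre.drop f.toNat).flatMap (fun tok => ' ' :: tok), acc, c) tok =
            (true, ((pre ++ [tok]).drop f.toNat).flatMap (fun tok => ' ' :: tok), acc, c) := by
          simp only [pvStepA, if_neg hstop]
          rw [List.drop_append_of_le_length hfnat]
          simp
        rw [hstep, ← hlen']
        apply ih (pre ++ [tok]) hsplit' acc prev true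
          (((pre ++ [tok]).drop f.toNat).flatMap (fun tok => ' ' :: tok)) c h1 (by simp; omega) h3
        · intro hf
          rw [hlen', hsucc, hfd] at hf
          simp [Option.or] at hf
        · intro f' hf
          rw [hlen', hsucc, hfd] at hf
          simp only [Option.or, Option.some.injEq] at hf
          subst hf
          exact ⟨rfl, rfl, hatg⟩

theorem pv_ports_eq (codon_list : String) :
    coding_region_finder codon_list = coding_region_finder_alt codon_list := by
  unfold coding_region_finder coding_region_finder_alt
  simp only []
  rw [show (List.foldl (fun st pos => pvStepA st (PySem.List.slice codon_list.toList (some pos) (some (pos + 3))))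
        (false, [], [], 0) (PySem.List.pyRange 0 (codon_list.toList.length : Int) 4)) =
      (List.foldl pvStepA (false, [], [], 0)
        ((PySem.List.pyRange 0 (codon_list.toList.length : Int) 4).map
          (fun i => PySem.List.slice codon_list.toList (some i) (some (i + 3))))) from
    by rw [List.foldl_map]]
  have h := pv_loop_eq
    ((PySem.List.pyRange 0 (codon_list.toList.length : Int) 4).map
      (fun i => PySem.List.slice codon_list.toList (some i) (some (i + 3))))
    ((PySem.List.pyRange 0 (codon_list.toList.length : Int) 4).map
      (fun i => PySem.List.slice codon_list.toList (some i) (some (i + 3))))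
    [] rfl [] (-1) false [] 0 (by norm_num) (by simp) (by simp)
    (fun _ => ⟨rfl, rfl⟩)
    (by intro f hf; simp [pvFind, PySem.List.pyRange_one_eq_nil] at hf)
  simpa using h

-- ===== VERDICT (by name: the statement is the Claim_ definition above) =====
theorem coding_region_finder_spec : Claim_equal_coding_region_finder := by
  intro s _
  exact pv_ports_eq s
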